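-- pv_equiv track=rewrite | github.com/pedro-adasilva/Pac-Man | src/pacman/game.py | _compute_super_pacgum_positions
-- ===== SOURCE A (Python) =====
-- def _compute_super_pacgum_positions(
--
--     width: int,
--     height: int,
--     available: set[tuple[int, int]],
-- ) -> set[tuple[int, int]]:
--     """Place up to 4 super-pacgums near maze corners."""
--     if not available:
--         return set()
--
--     corners = [
--         (0, 0),
--         (width - 1, 0),
--         (0, height - 1),
--         (width - 1, height - 1),
--     ]
--     placed: set[tuple[int, int]] = set()
--     remaining = set(available)
--
--     for cx, cy in corners:
--         if not remaining:
--             break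
--         chosen = min(
--             remaining,
--             key=lambda pos: (
--                 abs(pos[0] - cx) + abs(pos[1] - cy),
--                 pos[1],
--                 pos[0],
--             ),
--         )
--         placed.add(chosen)
--         remaining.remove(chosen)
--
--     return placed
-- ===== SOURCE B (Python) =====
-- def _compute_super_pacgum_positions(
--     width: int,
--     height: int,
--     available: set[tuple[int, int]],
-- ) -> set[tuple[int, int]]:
--     """Place up to 4 super-pacgums near maze corners.
--
--     For each corner, rank ALL available positions by that corner's key and
--     take the first one not already placed (instead of min over a shrinking set).
--     """
--     corners = [
--         (0, 0),
--         (width - 1, 0),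
--         (0, height - 1),
--         (width - 1, height - 1),
--     ]
--     placed: set[tuple[int, int]] = set()
--     for cx, cy in corners:
--         ranked = sorted(
--             available,
--             key=lambda pos: (abs(pos[0] - cx) + abs(pos[1] - cy), pos[1], pos[0]),
--         )
--         for pos in ranked:
--             if pos not in placed:
--                 placed.add(pos)
--                 break
--     return placed
-- ===== Notes on version B (the rewrite author's own statement) =====
-- stated objective: alternative
-- what changed: Replaces the min-over-a-shrinking-remaining-set scan per corner by a sort of all available positions per corner followed by taking the first position not already placed.
import Mathlib
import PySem

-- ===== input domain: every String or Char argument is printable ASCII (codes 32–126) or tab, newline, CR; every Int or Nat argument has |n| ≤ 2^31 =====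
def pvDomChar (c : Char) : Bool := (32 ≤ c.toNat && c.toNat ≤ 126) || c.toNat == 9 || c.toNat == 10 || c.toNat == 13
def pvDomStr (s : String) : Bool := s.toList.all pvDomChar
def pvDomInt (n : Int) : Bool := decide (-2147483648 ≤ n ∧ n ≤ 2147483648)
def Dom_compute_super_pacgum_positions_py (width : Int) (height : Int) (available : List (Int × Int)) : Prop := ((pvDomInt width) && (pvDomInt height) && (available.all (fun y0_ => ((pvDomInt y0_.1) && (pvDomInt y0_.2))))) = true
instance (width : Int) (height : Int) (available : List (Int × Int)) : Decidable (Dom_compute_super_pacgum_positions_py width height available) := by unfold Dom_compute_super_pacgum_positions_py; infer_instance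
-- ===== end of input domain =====

-- B replaces A's four min-scans over a shrinking remaining set by, per corner, sorting all
-- available positions with that corner's key and taking the first not already placed (alternative
-- decomposition, same results). The returned Python sets are produced in the same selection order.

-- Python's tuple key (abs(x-cx)+abs(y-cy), y, x), compared lexicographically.
def pacKey (c : Int × Int) (p : Int × Int) : Lex (Int × Lex (Int × Int)) :=
  toLex (|p.1 - c.1| + |p.2 - c.2|, toLex (p.2, p.1))

-- ===== PORT A =====
-- the 'for cx, cy in corners' loop: break on empty remaining; min(remaining, key=…);
-- placed.add(chosen); remaining.remove(chosen) (chosen ∈ remaining, so remove = List.erase).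
def pacLoopA : List (Int × Int) → List (Int × Int) → List (Int × Int) → List (Int × Int)
  | [], placed, _ => placed
  | c :: rest, placed, remaining =>
    if remaining = [] then placed
    else
      match PySem.List.min? remaining (pacKey c) with
      | none => placed
      | some chosen => pacLoopA rest (PySem.Set.add placed chosen) (remaining.erase chosen)

def compute_super_pacgum_positions_py (width : Int) (height : Int) (available : List (Int × Int)) : List (Int × Int) :=
  if available = [] then []
  else pacLoopA [(0, 0), (width - 1, 0), (0, height - 1), (width - 1, height - 1)]
         PySem.Set.empty (PySem.Set.ofList available)

-- ===== PORT B =====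
-- the inner 'for pos in ranked: if pos not in placed: placed.add(pos); break'
def pacPick : List (Int × Int) → List (Int × Int) → List (Int × Int)
  | [], placed => placed
  | p :: t, placed => if placed.contains p then pacPick t placed else PySem.Set.add placed p

def compute_super_pacgum_positions_py_alt (width : Int) (height : Int) (available : List (Int × Int)) : List (Int × Int) :=
  [((0 : Int), (0 : Int)), (width - 1, 0), (0, height - 1), (width - 1, height - 1)].foldl
    (fun placed c => pacPick (PySem.List.sorted available (pacKey c) false) placed)
    PySem.Set.empty

-- ===== PRECONDITION & SPEC =====
def Spec_compute_super_pacgum_positions_py (width : Int) (height : Int) (available : List (Int × Int)) (out : List (Int × Int)) : Prop := out = compute_super_pacgum_positions_py_alt width height available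
instance (width : Int) (height : Int) (available : List (Int × Int)) (out : List (Int × Int)) : Decidable (Spec_compute_super_pacgum_positions_py width height available out) := by unfold Spec_compute_super_pacgum_positions_py; infer_instance

-- ===== CLAIM (what is proved, stated in full; the proofs are below) =====
def Claim_equal_compute_super_pacgum_positions_py : Prop := ∀ (width : Int) (height : Int) (available : List (Int × Int)), Dom_compute_super_pacgum_positions_py width height available → Spec_compute_super_pacgum_positions_py width height available (compute_super_pacgum_positions_py width height available)

-- ===== LEMMAS AND PROOFS =====

-- the key determines the position (the tuple ends in (y, x))
lemma pacKey_inj (c p q : Int × Int) (h : pacKey c p = pacKey c q) : p = q := by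
  unfold pacKey at h
  have h1 := congrArg ofLex h
  simp only [ofLex_toLex, Prod.mk.injEq] at h1
  have h2 := congrArg ofLex h1.2
  simp only [ofLex_toLex, Prod.mk.injEq] at h2
  exact Prod.ext h2.2 h2.1

lemma pacPick_stable (l placed : List (Int × Int))
    (h : ∀ p ∈ l, placed.contains p = true) : pacPick l placed = placed := by
  induction l with
  | nil => rfl
  | cons p t ih =>
    simp only [pacPick, h p (by simp), if_true]
    exact ih fun q hq => h q (by simp [hq])

lemma pacPick_eq (c : Int × Int) (l placed : List (Int × Int)) (m : Int × Int)
    (hm : m ∈ l) (hnp : placed.contains m = false)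
    (hmin : ∀ x ∈ l, placed.contains x = false → pacKey c m ≤ pacKey c x)
    (hpair : l.Pairwise (fun a b => pacKey c a ≤ pacKey c b)) :
    pacPick l placed = placed ++ [m] := by
  induction l with
  | nil => cases hm
  | cons p t ih =>
    by_cases hp : placed.contains p = true
    · simp only [pacPick, hp, if_true]
      have hpm : p ≠ m := fun h => by rw [h, hnp] at hp; cases hp
      have hmt : m ∈ t := by
        rcases List.mem_cons.mp hm with h | h
        · exact absurd h.symm hpm
        · exact h
      exact ih hmt (fun x hx hxp => hmin x (by simp [hx]) hxp) hpair.tail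
    · have hpe : p = m := by
        have h1 : pacKey c m ≤ pacKey c p :=
          hmin p (by simp) (by simpa using hp)
        have h2 : pacKey c p ≤ pacKey c m := by
          rcases List.mem_cons.mp hm with h | h
          · exact le_of_eq (by rw [h])
          · exact (List.pairwise_cons.mp hpair).1 m h
        exact pacKey_inj c p m (le_antisymm h2 h1)
      subst hpe
      have hp' : p ∉ placed := by simpa using hp
      simp [pacPick, PySem.Set.add, PySem.Set.contains, hp']

lemma pacLoopA_break (available : List (Int × Int)) (corners : List (Int × Int))
    (placed : List (Int × Int)) (h : ∀ x ∈ available, placed.contains x = true) :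
    corners.foldl
      (fun pl c => pacPick (PySem.List.sorted available (pacKey c) false) pl) placed = placed := by
  induction corners with
  | nil => rfl
  | cons c rest ih =>
    simp only [List.foldl_cons]
    rw [pacPick_stable _ _ (fun p hp => h p ((PySem.List.mem_sorted _ _ _ _).mp hp))]
    exact ih

lemma pacLoop_eq (available : List (Int × Int)) :
    ∀ (corners placed remaining : List (Int × Int)), remaining.Nodup →
    (∀ x, x ∈ remaining ↔ (x ∈ available ∧ placed.contains x = false)) →
    pacLoopA corners placed remaining =
    corners.foldl
      (fun pl c => pacPick (PySem.List.sorted available (pacKey c) false) pl) placed := by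
  intro corners
  induction corners with
  | nil => intro placed remaining _ _; rfl
  | cons c rest ih =>
    intro placed remaining hnd hrel
    by_cases hre : remaining = []
    · simp only [pacLoopA, hre, if_true]
      exact (pacLoopA_break available (c :: rest) placed (fun x hx => by
        by_contra hc
        have : x ∈ remaining := (hrel x).mpr ⟨hx, by simpa using hc⟩
        simp [hre] at this)).symm
    · obtain ⟨m, hmin⟩ : ∃ m, PySem.List.min? remaining (pacKey c) = some m := by
        cases hmm : PySem.List.min? remaining (pacKey c) with
        | none => exact absurd ((PySem.List.min?_eq_none_iff _ _).mp hmm) hre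
        | some m => exact ⟨m, rfl⟩
      have hmem : m ∈ remaining := PySem.List.min?_mem hmin
      have hmav : m ∈ available := ((hrel m).mp hmem).1
      have hmnp : placed.contains m = false := ((hrel m).mp hmem).2
      simp only [pacLoopA, hre, if_false, hmin, List.foldl_cons]
      rw [pacPick_eq c _ placed m ((PySem.List.mem_sorted _ _ _ _).mpr hmav) hmnp
          (fun x hx hxp => PySem.List.min?_isMin hmin x
            ((hrel x).mpr ⟨(PySem.List.mem_sorted _ _ _ _).mp hx, hxp⟩))
          (PySem.List.sorted_pairwise available (pacKey c))]
      have hmnp' : m ∉ placed := by simpa using hmnp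
      have hadd : PySem.Set.add placed m = placed ++ [m] := by
        simp [PySem.Set.add, PySem.Set.contains, hmnp']
      rw [hadd]
      exact ih (placed ++ [m]) (remaining.erase m) (hnd.erase m) (fun x => by
        rw [List.Nodup.mem_erase_iff hnd]
        constructor
        · rintro ⟨hne, hx⟩
          obtain ⟨hav, hnp⟩ := (hrel x).mp hx
          have hnp' : x ∉ placed := by simpa using hnp
          refine ⟨hav, ?_⟩
          simp [hnp', hne]
        · rintro ⟨hav, hnp⟩
          have h2 : x ∉ placed ++ [m] := by simpa using hnp
          simp only [List.mem_append, List.mem_singleton, not_or] at h2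
          exact ⟨h2.2, (hrel x).mpr ⟨hav, by simpa using h2.1⟩⟩)

-- ===== VERDICT (by name: the statement is the Claim_ definition above) =====
theorem compute_super_pacgum_positions_py_spec : Claim_equal_compute_super_pacgum_positions_py := by
  intro width height available _
  unfold Spec_compute_super_pacgum_positions_py
  unfold compute_super_pacgum_positions_py compute_super_pacgum_positions_py_alt
  by_cases hav : available = []
  · subst hav
    simp only [if_true]
    rw [pacLoopA_break [] _ PySem.Set.empty (by simp)]
    rfl
  · simp only [hav, if_false]
    exact pacLoop_eq available _ PySem.Set.empty (PySem.Set.ofList available)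
      (PySem.Set.nodup_ofList available)
      (fun x => by simp [PySem.Set.mem_ofList, PySem.Set.empty])
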